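-- pv_equiv track=rewrite | github.com/yifding/hetseq | hetseq/evaluation/eval_bert_fine_tuning_el_with_valid_token_mask.py | generate_EL_label
-- ===== SOURCE A (Python) =====
-- NER_LABEL_DICT = {'B': 0, 'I': 1, 'O': 2}
--
-- _OUT_DICT_ENTITY_ID = -1
--
-- def generate_EL_label(entity_labels, labels):
--     EL_label = []
--     cur_entity = 'O'
--     for label, entity_label in zip(labels, entity_labels):
--         if label == -100 or label == NER_LABEL_DICT['O']:
--             assert entity_label == -100
--             cur_entity = 'O'
--             EL_label.append(cur_entity)
--
--         elif label == NER_LABEL_DICT['B']: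
--             # meet out of vocabulary entity
--             if entity_label == _OUT_DICT_ENTITY_ID:
--                 cur_entity = '-1'
--                 EL_label.append('B-' + cur_entity)
--
--             # only has NER label, no EL label
--             elif entity_label == -100:
--                 cur_entity = 'O'
--                 EL_label.append(cur_entity)
--
--             # has valid EL label within vocabulary
--             else:
--                 assert entity_label > 1
--                 cur_entity = str(entity_label)
--                 EL_label.append('B-' + cur_entity)
--         else:
--             assert label == NER_LABEL_DICT['I']
--             # meet out of vocabulary entity
--             if cur_entity == '-1':
--                 EL_label.append('I-' + cur_entity)
--
--             elif cur_entity == 'O':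
--                 EL_label.append(cur_entity)
--
--             else:
--                 assert int(cur_entity) > 1
--                 EL_label.append('I-' + cur_entity)
--
--     assert len(EL_label) == len(entity_labels) == len(labels)
--
--     return EL_label
-- ===== SOURCE B (Python) =====
-- def generate_EL_label(entity_labels, labels):
--     assert len(entity_labels) == len(labels)
--     n = len(labels)
--     out = []
--     i = 0
--     while i < n:
--         label, el = labels[i], entity_labels[i]
--         if label == 1:
--             # I with no open entity run: no entity carried here
--             out.append('O')
--             i += 1
--         elif label != 0:
--             assert label in (-100, 2) and el == -100
--             out.append('O')
--             i += 1
--         else: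
--             # B starts an entity run; consume the whole run of following I's
--             if el == -100:
--                 ent = None
--             elif el == -1:
--                 ent = '-1'
--             else:
--                 assert el > 1
--                 ent = str(el)
--             out.append('O' if ent is None else 'B-' + ent)
--             i += 1
--             while i < n and labels[i] == 1:
--                 out.append('O' if ent is None else 'I-' + ent)
--                 i += 1
--     return out
-- ===== Notes on version B (the rewrite author's own statement) =====
-- stated objective: alternative
-- what changed: Replaces A's flat per-token state machine that carries cur_entity across every iteration by a run-based scan: each non-I token is emitted alone and each B token consumes its whole run of following I tokens in an inner loop, so no entity state survives between outer iterations.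
import Mathlib
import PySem

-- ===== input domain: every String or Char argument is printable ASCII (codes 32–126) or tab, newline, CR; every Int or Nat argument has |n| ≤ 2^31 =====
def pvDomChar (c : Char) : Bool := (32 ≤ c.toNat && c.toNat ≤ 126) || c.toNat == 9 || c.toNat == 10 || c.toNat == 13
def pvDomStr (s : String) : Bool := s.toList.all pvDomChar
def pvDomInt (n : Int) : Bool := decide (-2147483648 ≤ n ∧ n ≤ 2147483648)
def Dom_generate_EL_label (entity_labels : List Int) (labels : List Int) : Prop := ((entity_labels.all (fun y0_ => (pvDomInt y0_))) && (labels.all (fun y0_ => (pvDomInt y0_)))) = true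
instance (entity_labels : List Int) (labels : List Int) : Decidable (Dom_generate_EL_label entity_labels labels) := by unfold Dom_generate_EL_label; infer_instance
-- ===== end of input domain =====

-- B replaces A's per-token carried-state machine by a run-based scan (each B consumes its
-- whole run of following I's in an inner loop); same return value on every input where A
-- returns (objective: alternative decomposition, not faster).

-- ===== PORT A =====
-- one step of A's for-loop: state = (cur_entity, EL_label); asserts are guaranteed by Pre_
def pvStepA (st : String × List String) (p : Int × Int) : String × List String :=
  let label := p.1; let entity_label := p.2
  let cur := st.1; let acc := st.2
  if label = -100 ∨ label = 2 then
    ("O", acc ++ ["O"])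
  else if label = 0 then
    if entity_label = -1 then ("-1", acc ++ ["B-" ++ "-1"])
    else if entity_label = -100 then ("O", acc ++ ["O"])
    else (PySem.Int.toStr entity_label, acc ++ ["B-" ++ PySem.Int.toStr entity_label])
  else
    if cur = "-1" then (cur, acc ++ ["I-" ++ cur])
    else if cur = "O" then (cur, acc ++ [cur])
    else (cur, acc ++ ["I-" ++ cur])

def generate_EL_label (entity_labels : List Int) (labels : List Int) : List String :=
  ((labels.zip entity_labels).foldl pvStepA ("O", [])).2

-- ===== PORT B =====
-- B's outer while-loop: a non-I token is emitted alone; a B token also consumes the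
-- run of following I tokens (the inner while-loop = takeWhile/dropWhile on the rest)
def pvRunB : List (Int × Int) → List String
  | [] => []
  | (label, el) :: rest =>
    if label = 1 then "O" :: pvRunB rest
    else if label ≠ 0 then "O" :: pvRunB rest
    else
      let ent : Option String :=
        if el = -100 then none
        else if el = -1 then some "-1"
        else some (PySem.Int.toStr el)
      let head := match ent with | none => "O" | some s => "B-" ++ s
      let run := rest.takeWhile (fun q => q.1 == 1)
      let rest' := rest.dropWhile (fun q => q.1 == 1)
      head :: (run.map (fun _ => match ent with | none => "O" | some s => "I-" ++ s) ++ pvRunB rest')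
termination_by l => l.length
decreasing_by
  all_goals (have := List.length_dropWhile_le (fun q : Int × Int => q.1 == 1) rest; simp; try omega)

def generate_EL_label_alt (entity_labels : List Int) (labels : List Int) : List String :=
  pvRunB (labels.zip entity_labels)

-- ===== PRECONDITION & SPEC =====
-- Pre_ excludes exactly the inputs where A raises AssertionError: unequal lengths (the
-- final length assert) and any zipped pair violating A's per-token asserts.
def Pre_generate_EL_label (entity_labels : List Int) (labels : List Int) : Prop :=
  labels.length = entity_labels.length ∧
  ∀ p ∈ labels.zip entity_labels,
    ((p.1 = -100 ∨ p.1 = 2) → p.2 = -100) ∧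
    (p.1 = 0 → p.2 = -1 ∨ p.2 = -100 ∨ 1 < p.2) ∧
    (p.1 = -100 ∨ p.1 = 0 ∨ p.1 = 1 ∨ p.1 = 2)
instance (entity_labels : List Int) (labels : List Int) : Decidable (Pre_generate_EL_label entity_labels labels) := by
  unfold Pre_generate_EL_label; infer_instance

def pvWitness_generate_EL_label : List Int × List Int := ([-1, -100, 5, -100], [0, 1, 0, 2])

def Spec_generate_EL_label (entity_labels : List Int) (labels : List Int) (out : List String) : Prop := out = generate_EL_label_alt entity_labels labels
instance (entity_labels : List Int) (labels : List Int) (out : List String) : Decidable (Spec_generate_EL_label entity_labels labels out) := by unfold Spec_generate_EL_label; infer_instance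

-- ===== CLAIM (what is proved, stated in full; the proofs are below) =====
def Claim_equal_generate_EL_label : Prop := ∀ (entity_labels : List Int) (labels : List Int), Dom_generate_EL_label entity_labels labels → Pre_generate_EL_label entity_labels labels → Spec_generate_EL_label entity_labels labels (generate_EL_label entity_labels labels)

-- ===== LEMMAS AND PROOFS =====

-- the per-pair condition of Pre_
def pvOkP (p : Int × Int) : Prop :=
  ((p.1 = -100 ∨ p.1 = 2) → p.2 = -100) ∧
  (p.1 = 0 → p.2 = -1 ∨ p.2 = -100 ∨ 1 < p.2) ∧
  (p.1 = -100 ∨ p.1 = 0 ∨ p.1 = 1 ∨ p.1 = 2)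

lemma pvDigitChar_ne_O : ∀ k < 10, Nat.digitChar k ≠ 'O' := by decide

lemma pvToDigitsCore_notO : ∀ (fuel n : ℕ) (ds : List Char), 'O' ∉ ds →
    'O' ∉ Nat.toDigitsCore 10 fuel n ds := by
  intro fuel
  induction fuel with
  | zero => intro n ds h; simpa [Nat.toDigitsCore] using h
  | succ f ih =>
    intro n ds h
    have hd : 'O' ∉ Nat.digitChar (n % 10) :: ds := by
      intro hmem
      rcases List.mem_cons.mp hmem with he | hm
      · exact pvDigitChar_ne_O (n % 10) (Nat.mod_lt _ (by norm_num)) he.symm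
      · exact h hm
    simp only [Nat.toDigitsCore]
    split
    · exact hd
    · exact ih _ _ hd

lemma pvToChars_notO (n : Int) : 'O' ∉ PySem.Int.toChars n := by
  unfold PySem.Int.toChars
  split
  · intro hmem
    rcases List.mem_cons.mp hmem with he | hm
    · exact absurd he (by decide)
    · exact pvToDigitsCore_notO _ _ [] (by simp) hm
  · exact pvToDigitsCore_notO _ _ [] (by simp)

lemma pvToStr_ne_O (n : Int) : PySem.Int.toStr n ≠ "O" := by
  intro h
  have := congrArg String.toList h
  rw [PySem.Int.toList_toStr] at this
  exact pvToChars_notO n (this ▸ List.mem_singleton.mpr rfl)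

-- folding A's step over a run of I-tokens keeps cur and appends one cell per token
lemma pvFoldRun (c : String) : ∀ (run : List (Int × Int)), (∀ p ∈ run, p.1 = 1) →
    ∀ acc, run.foldl pvStepA (c, acc) =
      (c, acc ++ run.map (fun _ => if c = "O" then "O" else "I-" ++ c)) := by
  intro run
  induction run with
  | nil => intro _ acc; simp
  | cons p rest ih =>
    intro hall acc
    have hp : p.1 = 1 := hall p (List.mem_cons_self)
    have hstep : pvStepA (c, acc) p =
        (c, acc ++ [if c = "O" then "O" else "I-" ++ c]) := by
      unfold pvStepA
      rw [hp]
      simp only [show ¬((1:Int) = -100 ∨ (1:Int) = 2) by decide,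
        show (1:Int) ≠ 0 by decide]
      by_cases h1 : c = "-1"
      · subst h1; simp
      · by_cases h2 : c = "O"
        · subst h2; simp
        · simp [h1, h2]
    rw [List.foldl_cons, hstep, ih (fun q hq => hall q (List.mem_cons_of_mem _ hq)) _]
    simp

lemma pvHeadNotI_dropWhile (rest : List (Int × Int)) :
    ∀ l e, (rest.dropWhile (fun q => q.1 == 1)).head? = some (l, e) → l ≠ 1 := by
  intro l e h hl
  have := List.head?_dropWhile_not (p := fun q : Int × Int => q.1 == 1) (l := rest)
  rw [h] at this
  simp [hl] at this

lemma pvMain : ∀ (N : ℕ) (ps : List (Int × Int)), ps.length ≤ N →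
    (∀ p ∈ ps, pvOkP p) →
    ∀ (c : String) (acc : List String),
      (c = "O" ∨ ∀ l e, ps.head? = some (l, e) → l ≠ 1) →
      (ps.foldl pvStepA (c, acc)).2 = acc ++ pvRunB ps := by
  intro N
  induction N with
  | zero =>
    intro ps hlen _ c acc _
    have : ps = [] := List.eq_nil_of_length_eq_zero (Nat.le_zero.mp hlen)
    subst this; simp [pvRunB]
  | succ n ih =>
    intro ps hlen hok c acc hc
    match ps with
    | [] => simp [pvRunB]
    | (l, e) :: rest =>
      have hokh : pvOkP (l, e) := hok _ (List.mem_cons_self)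
      have hokr : ∀ p ∈ rest, pvOkP p := fun p hp => hok p (List.mem_cons_of_mem _ hp)
      have hlen' : rest.length ≤ n := by simpa using hlen
      by_cases hl1 : l = 1
      · -- I token outside a run: cur must be "O"
        have hcO : c = "O" := by
          rcases hc with h | h
          · exact h
          · exact absurd hl1 (h l e rfl)
        subst hcO; subst hl1
        have hstep : pvStepA ("O", acc) (1, e) = ("O", acc ++ ["O"]) := by
          unfold pvStepA
          norm_num [show ("O":String) ≠ "-1" by decide]
        rw [List.foldl_cons, hstep, ih rest hlen' hokr "O" _ (Or.inl rfl)]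
        simp [pvRunB]
      · by_cases hl0 : l = 0
        · -- B token: step, then the I-run, then the tail
          subst hl0
          have hsplit : rest = rest.takeWhile (fun q => q.1 == 1) ++
              rest.dropWhile (fun q => q.1 == 1) :=
            (List.takeWhile_append_dropWhile).symm
          have hrun : ∀ p ∈ rest.takeWhile (fun q : Int × Int => q.1 == 1), p.1 = 1 := by
            intro p hp
            have := List.mem_takeWhile_imp hp
            simpa using this
          have hrest' : ∀ p ∈ rest.dropWhile (fun q : Int × Int => q.1 == 1), pvOkP p := by
            intro p hp
            exact hokr p (List.dropWhile_sublist _ |>.mem hp)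
          have hlenr : (rest.dropWhile (fun q : Int × Int => q.1 == 1)).length ≤ n :=
            le_trans (List.length_dropWhile_le _ _) hlen'
          -- the three entity cases
          rcases hokh.2.1 rfl with he | he | he
          · -- el = -1
            subst he
            have hstep : pvStepA (c, acc) (0, -1) = ("-1", acc ++ ["B-" ++ "-1"]) := by
              unfold pvStepA; norm_num
            rw [List.foldl_cons, hstep]
            conv_lhs => rw [hsplit, List.foldl_append,
              pvFoldRun "-1" _ hrun _,
              ih _ hlenr hrest' "-1" _ (Or.inr (pvHeadNotI_dropWhile rest))]
            simp [pvRunB]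
          · -- el = -100
            subst he
            have hstep : pvStepA (c, acc) (0, -100) = ("O", acc ++ ["O"]) := by
              unfold pvStepA; norm_num
            rw [List.foldl_cons, hstep]
            conv_lhs => rw [hsplit, List.foldl_append,
              pvFoldRun "O" _ hrun _,
              ih _ hlenr hrest' "O" _ (Or.inl rfl)]
            simp [pvRunB]
          · -- el > 1
            have hne1 : e ≠ -1 := by omega
            have hne100 : e ≠ -100 := by omega
            have hstep : pvStepA (c, acc) (0, e) =
                (PySem.Int.toStr e, acc ++ ["B-" ++ PySem.Int.toStr e]) := by
              unfold pvStepA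
              simp [hne1, hne100]
            rw [List.foldl_cons, hstep]
            conv_lhs => rw [hsplit, List.foldl_append,
              pvFoldRun (PySem.Int.toStr e) _ hrun _,
              ih _ hlenr hrest' (PySem.Int.toStr e) _ (Or.inr (pvHeadNotI_dropWhile rest))]
            simp [pvRunB, hne1, hne100, pvToStr_ne_O e]
        · -- l = -100 or l = 2: reset to "O"
          have hl : l = -100 ∨ l = 2 := by
            rcases hokh.2.2 with h | h | h | h
            · exact Or.inl h
            · exact absurd h hl0
            · exact absurd h hl1
            · exact Or.inr h
          have hstep : pvStepA (c, acc) (l, e) = ("O", acc ++ ["O"]) := by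
            unfold pvStepA
            simp [hl]
          rw [List.foldl_cons, hstep, ih rest hlen' hokr "O" _ (Or.inl rfl)]
          have : ¬ l = 1 := hl1
          rcases hl with h | h <;> subst h <;> simp [pvRunB]

-- ===== VERDICT (by name: the statement is the Claim_ definition above) =====
theorem generate_EL_label_spec : Claim_equal_generate_EL_label := by
  intro entity_labels labels _ hpre
  unfold Spec_generate_EL_label generate_EL_label generate_EL_label_alt
  exact pvMain (labels.zip entity_labels).length _ le_rfl
    (fun p hp => hpre.2 p hp) "O" [] (Or.inl rfl)
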